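-- pv_equiv track=rewrite | github.com/mail-liam/advent-of-code | python/2022/day6.py | get_first_unique_length_index
-- ===== SOURCE A (Python) =====
-- from collections import deque
--
-- def get_first_unique_length_index(data, length):
--     queue = deque(maxlen=length)
--     total = 0
--     for char in data:
--         total += 1
--         queue.append(char)
--
--         if len(set(queue)) == length:
--             break
--
--     return total
-- ===== SOURCE B (Python) =====
-- def get_first_unique_length_index(data, length):
--     last = {}
--     start = 0
--     for i, char in enumerate(data):
--         prev = last.get(char)
--         if prev is not None and prev >= start:
--             start = prev + 1
--         last[char] = i
--         if i - start + 1 >= length: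
--             return i + 1
--     return len(data)
-- ===== Notes on version B (the rewrite author's own statement) =====
-- stated objective: faster
-- what changed: Replaced rebuilding a set of the whole deque window at every character (O(n*length)) with a one-pass sliding window using a last-seen-index map and a window-start pointer (O(n)).
import Mathlib
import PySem

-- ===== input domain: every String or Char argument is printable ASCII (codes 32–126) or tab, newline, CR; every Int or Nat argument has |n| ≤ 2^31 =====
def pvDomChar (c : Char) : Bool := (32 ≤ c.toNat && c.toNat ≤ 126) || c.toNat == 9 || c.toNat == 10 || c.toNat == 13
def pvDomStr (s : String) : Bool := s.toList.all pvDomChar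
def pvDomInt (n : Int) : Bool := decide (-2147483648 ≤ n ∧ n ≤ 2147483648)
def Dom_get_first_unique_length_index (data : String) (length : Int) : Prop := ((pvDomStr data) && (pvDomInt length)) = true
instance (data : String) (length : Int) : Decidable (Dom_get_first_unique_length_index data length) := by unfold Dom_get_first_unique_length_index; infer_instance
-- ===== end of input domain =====

-- B replaces A's per-character set-rebuild of the deque window by a one-pass sliding window
-- with a last-seen-index map (objective: faster, O(n) instead of O(n*length)).


-- ===== PORT A =====
-- deque(maxlen=length).append: append on the right, discard from the left when over capacity
def pvDequeAppend (q : List Char) (c : Char) (length : Int) : List Char :=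
  let q' := q ++ [c]
  if (q'.length : Int) > length then q'.tail else q'

def pvALoop (length : Int) : List Char → List Char → Int → Int
  | [], _, total => total
  | c :: rest, queue, total =>
    let total' := total + 1
    let queue' := pvDequeAppend queue c length
    if ((PySem.Set.ofList queue').length : Int) = length then total'
    else pvALoop length rest queue' total'

def get_first_unique_length_index (data : String) (length : Int) : Int :=
  pvALoop length data.toList [] 0

-- ===== PORT B =====
-- the `for i, char in enumerate(data)` loop: i is carried as a counter; n is len(data)
def pvBLoop (length : Int) : List Char → PySem.Dict Char Int → Int → Int → Int → Int
  | [], _, _, _, n => n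
  | c :: rest, last, start, i, n =>
    let start' := match last.get? c with
      | some prev => if prev ≥ start then prev + 1 else start
      | none => start
    let last' := last.insert c i
    if i - start' + 1 ≥ length then i + 1
    else pvBLoop length rest last' start' (i + 1) n

def get_first_unique_length_index_alt (data : String) (length : Int) : Int :=
  pvBLoop length data.toList PySem.Dict.empty 0 0 (data.toList.length : Int)

-- ===== PRECONDITION & SPEC =====
-- A raises ValueError (deque(maxlen=length) with negative maxlen) when length < 0; excluded.
def Pre_get_first_unique_length_index (data : String) (length : Int) : Prop := 0 ≤ length
instance (data : String) (length : Int) : Decidable (Pre_get_first_unique_length_index data length) := by unfold Pre_get_first_unique_length_index; infer_instance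

def pvWitness_get_first_unique_length_index : String × Int := ("abcdaabc", 3)

def Spec_get_first_unique_length_index (data : String) (length : Int) (out : Int) : Prop := out = get_first_unique_length_index_alt data length
instance (data : String) (length : Int) (out : Int) : Decidable (Spec_get_first_unique_length_index data length out) := by unfold Spec_get_first_unique_length_index; infer_instance

-- ===== CLAIM (what is proved, stated in full; the proofs are below) =====
def Claim_equal_get_first_unique_length_index : Prop := ∀ (data : String) (length : Int), Dom_get_first_unique_length_index data length → Pre_get_first_unique_length_index data length → Spec_get_first_unique_length_index data length (get_first_unique_length_index data length)


-- ===== LEMMAS AND PROOFS =====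

def lastPos : List Char → Char → Option Nat
  | [], _ => none
  | c :: rest, ch =>
    match lastPos rest ch with
    | some k => some (k + 1)
    | none => if c = ch then some 0 else none

lemma lastPos_append (p : List Char) (c ch : Char) :
    lastPos (p ++ [c]) ch = if c = ch then some p.length else lastPos p ch := by
  induction p with
  | nil => simp [lastPos]
  | cons a p ih =>
    simp only [List.cons_append, lastPos, ih]
    by_cases h : c = ch
    · simp [h]
    · simp [if_neg h]

lemma lastPos_lt_length {p : List Char} {ch : Char} {k : Nat} (h : lastPos p ch = some k) :
    k < p.length := by
  induction p generalizing k with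
  | nil => simp [lastPos] at h
  | cons a p ih =>
    simp only [lastPos] at h
    cases hl : lastPos p ch with
    | some m => rw [hl] at h; simp at h; have := ih hl; simp; omega
    | none =>
      rw [hl] at h
      split_ifs at h with hac
      all_goals simp_all
      omega

lemma lastPos_eq_none_iff (p : List Char) (ch : Char) : lastPos p ch = none ↔ ch ∉ p := by
  induction p with
  | nil => simp [lastPos]
  | cons a p ih =>
    simp only [lastPos]
    cases hl : lastPos p ch with
    | some m =>
      rw [hl] at ih
      simp only [List.mem_cons, not_or]
      constructor
      · intro h; simp at h
      · rintro ⟨-, h2⟩; exact (by simpa using ih.mpr h2)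
    | none =>
      rw [hl] at ih
      simp only [List.mem_cons, not_or]
      split_ifs with h
      · simp [h]
      · simpa [Ne.symm h] using ih

lemma not_mem_drop_iff (p : List Char) (ch : Char) (t : Nat) :
    ch ∉ p.drop t ↔ (match lastPos p ch with | some k => k < t | none => True) := by
  induction p generalizing t with
  | nil => simp [lastPos]
  | cons a p ih =>
    cases t with
    | zero =>
      rw [List.drop_zero, ← lastPos_eq_none_iff]
      cases lastPos (a :: p) ch <;> simp
    | succ t =>
      rw [List.drop_succ_cons, ih t]
      simp only [lastPos]
      cases hl : lastPos p ch with
      | some m => simp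
      | none => split_ifs with h
                all_goals simp

def sOf (p : List Char) : Nat :=
  Nat.find (show ∃ s, (p.drop s).Nodup from ⟨p.length, by simp⟩)

lemma nodup_drop_iff (p : List Char) (t : Nat) : (p.drop t).Nodup ↔ sOf p ≤ t := by
  constructor
  · intro h; exact Nat.find_le h
  · intro h
    have hs : (p.drop (sOf p)).Nodup := Nat.find_spec (show ∃ s, (p.drop s).Nodup from ⟨p.length, by simp⟩)
    have : p.drop t = (p.drop (sOf p)).drop (t - sOf p) := by
      rw [List.drop_drop]; congr 1; omega
    rw [this]
    exact hs.sublist (List.drop_sublist _ _)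

lemma sOf_le_length (p : List Char) : sOf p ≤ p.length := by
  exact Nat.find_le (by simp)

lemma nodup_drop_append_iff (p : List Char) (c : Char) (t : Nat) (ht : t ≤ p.length) :
    ((p ++ [c]).drop t).Nodup ↔ (p.drop t).Nodup ∧ c ∉ p.drop t := by
  rw [List.drop_append_of_le_length ht, List.nodup_append]
  constructor
  · rintro ⟨h1, -, h3⟩
    exact ⟨h1, fun hc => h3 c hc c (by simp) rfl⟩
  · rintro ⟨h1, h2⟩
    exact ⟨h1, by simp, fun a ha b hb => by simp at hb; subst hb; exact fun h => h2 (h ▸ ha)⟩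

lemma sOf_append_le_iff (p : List Char) (c : Char) (t : Nat) (ht : t ≤ p.length) :
    sOf (p ++ [c]) ≤ t ↔ sOf p ≤ t ∧ c ∉ p.drop t := by
  rw [← nodup_drop_iff, nodup_drop_append_iff p c t ht, nodup_drop_iff]

lemma sOf_append_le_len (p : List Char) (c : Char) : sOf (p ++ [c]) ≤ p.length := by
  rw [← nodup_drop_iff, List.drop_append_of_le_length le_rfl, List.drop_length]
  simp

lemma sOf_append_some (p : List Char) (c : Char) (k : Nat) (hl : lastPos p c = some k) :
    sOf (p ++ [c]) = max (sOf p) (k + 1) := by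
  have hk : k < p.length := lastPos_lt_length hl
  apply le_antisymm
  · refine (sOf_append_le_iff p c _ (by simp [sOf_le_length p]; omega)).mpr ⟨le_max_left _ _, ?_⟩
    simp [not_mem_drop_iff, hl]
  · have h := (sOf_append_le_iff p c _ (sOf_append_le_len p c)).mp le_rfl
    have h2 := h.2
    simp [not_mem_drop_iff, hl] at h2
    omega

lemma sOf_append_none (p : List Char) (c : Char) (hl : lastPos p c = none) :
    sOf (p ++ [c]) = sOf p := by
  apply le_antisymm
  · refine (sOf_append_le_iff p c _ (sOf_le_length p)).mpr ⟨le_rfl, ?_⟩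
    simp [not_mem_drop_iff, hl]
  · exact ((sOf_append_le_iff p c _ (sOf_append_le_len p c)).mp le_rfl).1

lemma ofList_length_eq_iff (xs : List Char) :
    (PySem.Set.ofList xs).length = xs.length ↔ xs.Nodup := by
  constructor
  · intro h
    have hfin : (PySem.Set.ofList xs).toFinset = xs.toFinset := by
      ext x; simp [PySem.Set.mem_ofList]
    have h1 : (PySem.Set.ofList xs).toFinset.card = (PySem.Set.ofList xs).length :=
      List.toFinset_card_of_nodup (PySem.Set.nodup_ofList xs)
    have h2 : xs.toFinset.card = xs.length := by rw [← hfin, h1, h]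
    have h3 := Multiset.toFinset_card_eq_card_iff_nodup.mp (by simpa using h2)
    simpa using h3
  · intro h
    have := PySem.Set.ofList_eq_self_of_nodup xs h
    simp [this]


lemma cond_iff (L : Int) (hL : 0 ≤ L) (p : List Char) :
    (((PySem.Set.ofList (p.drop (p.length - L.toNat))).length : Int) = L)
      ↔ ((p.length : Int) - (sOf p : Int) ≥ L) := by
  have hcast : (L.toNat : Int) = L := Int.toNat_of_nonneg hL
  have hw : (p.drop (p.length - L.toNat)).length = p.length - (p.length - L.toNat) := by
    simp
  have hsl := sOf_le_length p
  by_cases hnd : (p.drop (p.length - L.toNat)).Nodup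
  · rw [PySem.Set.ofList_eq_self_of_nodup _ hnd]
    have h2 := (nodup_drop_iff p _).mp hnd
    omega
  · have h1 := PySem.Set.length_ofList_le (p.drop (p.length - L.toNat))
    have h2 : ¬ (PySem.Set.ofList (p.drop (p.length - L.toNat))).length = (p.drop (p.length - L.toNat)).length :=
      fun h => hnd ((ofList_length_eq_iff _).mp h)
    have h3 : ¬ sOf p ≤ p.length - L.toNat := fun h => hnd ((nodup_drop_iff p _).mpr h)
    omega

lemma deque_step (L : Int) (hL : 0 ≤ L) (p : List Char) (c : Char) :
    pvDequeAppend (p.drop (p.length - L.toNat)) c L = (p ++ [c]).drop ((p ++ [c]).length - L.toNat) := by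
  have hsub : p.length - L.toNat ≤ p.length := by omega
  have hq : p.drop (p.length - L.toNat) ++ [c] = (p ++ [c]).drop (p.length - L.toNat) :=
    (List.drop_append_of_le_length hsub).symm
  simp only [pvDequeAppend, hq]
  have hlen : ((p ++ [c]).drop (p.length - L.toNat)).length = p.length + 1 - (p.length - L.toNat) := by
    simp
  split_ifs with h
  · rw [List.tail_drop]
    congr 1
    simp only [List.length_append, List.length_singleton]
    rw [hlen] at h
    omega
  · rw [hlen] at h
    have : p.length < L.toNat := by omega
    congr 1
    simp only [List.length_append, List.length_singleton]
    omega



def LastInv (p : List Char) (d : PySem.Dict Char Int) : Prop :=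
  ∀ ch, d.get? ch = (lastPos p ch).map (fun k : Nat => (k : Int))

lemma lastInv_step (p : List Char) (d : PySem.Dict Char Int) (c : Char) (hinv : LastInv p d) :
    LastInv (p ++ [c]) (d.insert c (p.length : Int)) := by
  intro ch
  by_cases h : ch = c
  · subst h
    rw [PySem.Dict.get?_insert_self, lastPos_append, if_pos rfl, Option.map_some]
  · rw [PySem.Dict.get?_insert_of_ne d _ h, hinv ch, lastPos_append, if_neg (fun hc => h hc.symm)]

lemma loop_eq (L : Int) (hL : 0 ≤ L) (rest : List Char) :
    ∀ (p : List Char) (d : PySem.Dict Char Int) (n : Int), LastInv p d →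
      n = (p.length : Int) + (rest.length : Int) →
      pvALoop L rest (p.drop (p.length - L.toNat)) (p.length : Int)
        = pvBLoop L rest d ((sOf p : Int)) ((p.length : Int)) n := by
  induction rest with
  | nil =>
    intro p d n _ hn
    simp only [pvALoop, pvBLoop]
    simp at hn
    omega
  | cons c rest ih =>
    intro p d n hinv hn
    simp only [pvALoop, pvBLoop]
    rw [deque_step L hL p c]
    rw [hinv c]
    have hstart : (match (lastPos p c).map (fun k : Nat => (k : Int)) with
        | some prev => if prev ≥ ((sOf p : Nat) : Int) then prev + 1 else ((sOf p : Nat) : Int)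
        | none => ((sOf p : Nat) : Int)) = ((sOf (p ++ [c]) : Nat) : Int) := by
      cases hl : lastPos p c with
      | some k =>
        simp only [Option.map_some]
        rw [sOf_append_some p c k hl]
        by_cases hk : ((k : Nat) : Int) ≥ ((sOf p : Nat) : Int)
        · rw [if_pos hk]; push_cast; omega
        · rw [if_neg hk]; push_cast; omega
      | none =>
        simp only [Option.map_none]
        rw [sOf_append_none p c hl]
    rw [hstart]
    have hroom := cond_iff L hL (p ++ [c])
    by_cases hbrk : ((p.length : Int) + 1 - (sOf (p ++ [c]) : Int) ≥ L)
    · have hA : ((PySem.Set.ofList ((p ++ [c]).drop ((p ++ [c]).length - L.toNat))).length : Int) = L := by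
        apply hroom.mpr
        simp only [List.length_append, List.length_singleton]
        push_cast
        omega
      have hB : (p.length : Int) - ((sOf (p ++ [c]) : Nat) : Int) + 1 ≥ L := by omega
      rw [if_pos hA, if_pos hB]
    · have hA : ¬ ((PySem.Set.ofList ((p ++ [c]).drop ((p ++ [c]).length - L.toNat))).length : Int) = L := by
        intro h
        have := hroom.mp h
        simp only [List.length_append, List.length_singleton] at this
        push_cast at this
        omega
      have hB : ¬ ((p.length : Int) - ((sOf (p ++ [c]) : Nat) : Int) + 1 ≥ L) := by omega
      rw [if_neg hA, if_neg hB]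
      have hlen : ((p ++ [c]).length : Int) = (p.length : Int) + 1 := by simp
      have := ih (p ++ [c]) (d.insert c (p.length : Int)) n (lastInv_step p d c hinv)
        (by simp only [List.length_append, List.length_cons, List.length_nil] at hn ⊢; push_cast at hn ⊢; omega)
      rw [hlen] at this
      exact this

lemma sOf_nil : sOf ([] : List Char) = 0 :=
  Nat.le_zero.mp ((nodup_drop_iff [] 0).mp (by simp))

theorem final (data : String) (L : Int) (hL : 0 ≤ L) :
    pvALoop L data.toList [] 0 = pvBLoop L data.toList PySem.Dict.empty 0 0 ((data.toList.length : Nat) : Int) := by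
  have h := loop_eq L hL data.toList [] PySem.Dict.empty ((data.toList.length : Nat) : Int)
    (fun ch => by simp [lastPos, PySem.Dict.get?_empty]) (by simp)
  simpa [sOf_nil] using h

-- ===== VERDICT (by name: the statement is the Claim_ definition above) =====
theorem get_first_unique_length_index_spec : Claim_equal_get_first_unique_length_index := by
  intro data length hdom hpre
  unfold Pre_get_first_unique_length_index at hpre
  unfold Spec_get_first_unique_length_index get_first_unique_length_index get_first_unique_length_index_alt
  exact final data length hpre
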